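-- pv_equiv track=rewrite | github.com/badboj40/advent-of-code | 2015/14.py | part2
-- ===== SOURCE A (Python) =====
-- TRAVEL_TIME = 2503
--
-- def part2(indata):
--   distance = dict()
--   score = dict()
--   for reindeer in indata.keys():
--     distance[reindeer] = 0
--     score[reindeer] = 0
--   for i in range(TRAVEL_TIME):
--     for reindeer in indata.keys():
--       distance[reindeer] += indata[reindeer][i%len(indata[reindeer])]
--     score[max(distance, key=distance.get)] += 1
--
--   return score[max(score, key=score.get)]
-- ===== SOURCE B (Python) =====
-- TRAVEL_TIME = 2503
--
--
-- def part2(indata):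
--     # Pass 1: materialise each reindeer's cumulative-distance trajectory.
--     table = {}
--     for reindeer, speeds in indata.items():
--         n = len(speeds)
--         total = 0
--         cum = []
--         for t in range(TRAVEL_TIME):
--             total += speeds[t % n]
--             cum.append(total)
--         table[reindeer] = cum
--     # Pass 2: score each second against the precomputed trajectories.
--     names = list(indata)
--     score = {r: 0 for r in names}
--     for t in range(TRAVEL_TIME):
--         leader = names[0]
--         for r in names[1:]:
--             if table[r][t] > table[leader][t]:
--                 leader = r
--         score[leader] += 1
--     return max(score.values())
-- ===== Notes on version B (the rewrite author's own statement) =====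
-- stated objective: alternative
-- what changed: A interleaves the per-second distance updates with scoring inside one loop over dicts keyed by max(key=dict.get); B first materialises each reindeer's full cumulative-distance trajectory as a list, then scores the seconds in a separate pass with an explicit first-argmax scan, returning max(score.values()).
import Mathlib
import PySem

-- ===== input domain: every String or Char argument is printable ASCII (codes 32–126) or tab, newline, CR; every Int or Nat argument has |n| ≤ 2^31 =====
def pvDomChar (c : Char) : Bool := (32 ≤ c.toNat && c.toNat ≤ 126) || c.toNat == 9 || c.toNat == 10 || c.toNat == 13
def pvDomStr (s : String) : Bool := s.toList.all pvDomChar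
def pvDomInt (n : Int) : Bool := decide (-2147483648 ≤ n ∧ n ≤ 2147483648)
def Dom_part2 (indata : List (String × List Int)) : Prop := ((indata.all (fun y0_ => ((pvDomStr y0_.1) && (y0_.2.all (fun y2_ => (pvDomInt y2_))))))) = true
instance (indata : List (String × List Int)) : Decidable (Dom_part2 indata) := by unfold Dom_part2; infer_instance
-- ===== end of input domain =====

-- B re-decomposes A: it first materialises each reindeer's full cumulative-distance
-- trajectory, then scores the seconds in a separate pass (objective: alternative decomposition).

-- ===== PORT A =====

-- TRAVEL_TIME = 2503
def pvTravelTime : Int := 2503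

-- indata[r]: lookup in the dict parameter (first match, per the assoc-list convention)
def pvSpeeds (indata : List (String × List Int)) (r : String) : List Int :=
  PySem.Dict.getD (PySem.Dict.mk indata) r []

-- speeds[i % len(speeds)] — shared primitive expression of both Pythons;
-- `.getD 0`: the `none` case is exactly len(speeds) = 0 (Python's ZeroDivisionError), excluded by Pre_
def pvTick (sp : List Int) (i : Int) : Int :=
  (PySem.List.pyGet? sp (PySem.Int.mod i (sp.length : Int))).getD 0

-- one tick of A's main loop: update every distance, then score the leader
def pvLoopA (indata : List (String × List Int)) (keys : List String)
    (p : PySem.Dict String Int × PySem.Dict String Int) (i : Int) :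
    PySem.Dict String Int × PySem.Dict String Int :=
  let dist := keys.foldl (fun d r => d.insert r (d.getD r 0 + pvTick (pvSpeeds indata r) i)) p.1
  -- max(distance, key=distance.get); `.getD ""`: `none` only for an empty dict (ValueError), excluded by Pre_
  let leader := (PySem.List.max? dist.keys (fun k => dist.getD k 0)).getD ""
  (dist, p.2.insert leader (p.2.getD leader 0 + 1))

def part2 (indata : List (String × List Int)) : Int :=
  let keys := (PySem.Dict.mk indata).keys
  let init := keys.foldl
    (fun (p : PySem.Dict String Int × PySem.Dict String Int) r => (p.1.insert r 0, p.2.insert r 0))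
    (PySem.Dict.empty, PySem.Dict.empty)
  let score := ((PySem.List.pyRange 0 pvTravelTime 1).foldl (pvLoopA indata keys) init).2
  -- score[max(score, key=score.get)]
  score.getD ((PySem.List.max? score.keys (fun k => score.getD k 0)).getD "") 0

-- ===== PORT B =====

-- pass 1 inner loop: the cumulative-distance trajectory of one reindeer
def pvCum (speeds : List Int) : List Int :=
  ((PySem.List.pyRange 0 pvTravelTime 1).foldl
    (fun (st : Int × List Int) t => (st.1 + pvTick speeds t, st.2 ++ [st.1 + pvTick speeds t]))
    (0, [])).2

-- table = {reindeer: trajectory}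
def pvTable (indata : List (String × List Int)) : PySem.Dict String (List Int) :=
  indata.foldl (fun tb p => tb.insert p.1 (pvCum p.2)) PySem.Dict.empty

-- score = {r: 0 for r in names}
def pvZeroDict (names : List String) : PySem.Dict String Int :=
  names.foldl (fun s r => s.insert r 0) PySem.Dict.empty

-- pass 2 body: pick the leader at second t by an explicit first-argmax scan, score it
def pvLoopB (table : PySem.Dict String (List Int)) (names : List String)
    (s : PySem.Dict String Int) (t : Int) : PySem.Dict String Int :=
  let leader := (PySem.List.slice names (some 1) none).foldl
    (fun ld r =>
      if (PySem.List.pyGet? (table.getD r []) t).getD 0 >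
         (PySem.List.pyGet? (table.getD ld []) t).getD 0 then r else ld)
    ((PySem.List.pyGet? names 0).getD "")   -- names[0]; IndexError on empty input, excluded by Pre_
  s.insert leader (s.getD leader 0 + 1)

def part2_alt (indata : List (String × List Int)) : Int :=
  let names := (PySem.Dict.mk indata).keys
  let score := (PySem.List.pyRange 0 pvTravelTime 1).foldl
    (pvLoopB (pvTable indata) names) (pvZeroDict names)
  -- max(score.values())
  (PySem.List.max? score.values (fun v => v)).getD 0

-- ===== PRECONDITION & SPEC =====

-- Pre_ excludes the empty dict (max() raises ValueError) and any empty speed list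
-- (i % 0 raises ZeroDivisionError); the Nodup conjunct is representation-level only:
-- a Python dict cannot hold duplicate keys, so it excludes no Python input.
def Pre_part2 (indata : List (String × List Int)) : Prop :=
  indata ≠ [] ∧ (indata.map Prod.fst).Nodup ∧ ∀ p ∈ indata, p.2 ≠ []
instance (indata : List (String × List Int)) : Decidable (Pre_part2 indata) := by
  unfold Pre_part2; infer_instance

def pvWitness_part2 : (List (String × List Int)) := [("a", [1]), ("b", [2, 3])]

def Spec_part2 (indata : List (String × List Int)) (out : Int) : Prop := out = part2_alt indata
instance (indata : List (String × List Int)) (out : Int) : Decidable (Spec_part2 indata out) := by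
  unfold Spec_part2; infer_instance

-- ===== CLAIM (what is proved, stated in full; the proofs are below) =====
def Claim_equal_part2 : Prop := ∀ (indata : List (String × List Int)), Dom_part2 indata → Pre_part2 indata → Spec_part2 indata (part2 indata)

-- ===== LEMMAS AND PROOFS =====

-- total distance of a reindeer with speed list sp after n seconds
def pvTot (sp : List Int) (n : Nat) : Int :=
  ((List.range n).map (fun j => pvTick sp (j : Int))).sum

lemma pvTot_succ (sp : List Int) (n : Nat) :
    pvTot sp (n + 1) = pvTot sp n + pvTick sp (n : Int) := by
  simp [pvTot, List.range_succ]

lemma pvCum_fold (sp : List Int) (n : Nat) :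
    ((List.range n).map (fun k => ((k : Nat) : Int))).foldl
      (fun (st : Int × List Int) t => (st.1 + pvTick sp t, st.2 ++ [st.1 + pvTick sp t]))
      (0, []) = (pvTot sp n, (List.range n).map (fun k => pvTot sp (k + 1))) := by
  induction n with
  | zero => simp [pvTot]
  | succ m ih =>
      simp only [List.range_succ, List.map_append, List.foldl_append, ih]
      simp [pvTot_succ]

lemma pvCum_eq (sp : List Int) :
    pvCum sp = (List.range 2503).map (fun k => pvTot sp (k + 1)) := by
  have h : PySem.List.pyRange 0 pvTravelTime 1
      = (List.range 2503).map (fun k => ((k : Nat) : Int)) := by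
    have := PySem.List.pyRange_zero_natCast 2503
    simpa [pvTravelTime] using this
  simp [pvCum, h, pvCum_fold]

lemma pvSpeeds_eq (indata : List (String × List Int)) (r : String) (sp : List Int)
    (hnd : (indata.map Prod.fst).Nodup) (hmem : (r, sp) ∈ indata) :
    pvSpeeds indata r = sp := by
  have : (PySem.Dict.mk indata).keys.Nodup := hnd
  exact PySem.Dict.getD_of_mem_items (PySem.Dict.mk indata) hmem this []

lemma pvTable_items (indata : List (String × List Int))
    (hnd : (indata.map Prod.fst).Nodup) :
    (pvTable indata).items = indata.map (fun p => (p.1, pvCum p.2)) := by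
  have := PySem.Dict.items_foldl_insert_fresh indata Prod.fst (fun p => pvCum p.2)
      (PySem.Dict.empty : PySem.Dict String (List Int))
      (fun a _ => PySem.Dict.contains_empty a.1) hnd
  simpa [pvTable] using this

lemma pvTable_getD (indata : List (String × List Int)) (r : String) (sp : List Int)
    (hnd : (indata.map Prod.fst).Nodup) (hmem : (r, sp) ∈ indata) :
    (pvTable indata).getD r [] = pvCum sp := by
  have hk : (pvTable indata).keys.Nodup := by
    have : (pvTable indata).keys = indata.map Prod.fst := by
      simp [PySem.Dict.keys, pvTable_items indata hnd]
    simpa [this] using hnd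
  refine PySem.Dict.getD_of_mem_items _ ?_ hk []
  rw [pvTable_items indata hnd]
  exact List.mem_map.mpr ⟨(r, sp), hmem, rfl⟩

lemma pvZeroDict_items (names : List String) (hnd : names.Nodup) :
    (pvZeroDict names).items = names.map (fun r => (r, (0 : Int))) := by
  have := PySem.Dict.items_foldl_insert_fresh names (fun r => r) (fun _ => (0 : Int))
      (PySem.Dict.empty : PySem.Dict String Int)
      (fun a _ => PySem.Dict.contains_empty a) (by simpa using hnd)
  simpa [pvZeroDict] using this

lemma pvZeroDict_keys (names : List String) (hnd : names.Nodup) :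
    (pvZeroDict names).keys = names := by
  simp [PySem.Dict.keys, pvZeroDict_items names hnd, Function.comp_def]

lemma pvZeroDict_getD (names : List String) (hnd : names.Nodup) (r : String) (hr : r ∈ names) :
    (pvZeroDict names).getD r 0 = 0 := by
  refine PySem.Dict.getD_of_mem_items _ ?_ (by rw [pvZeroDict_keys names hnd]; exact hnd) 0
  rw [pvZeroDict_items names hnd]
  exact List.mem_map.mpr ⟨r, hr, rfl⟩

-- a fold of inserts over distinct keys adds f k to each key once
lemma pvFoldl_insert_getD (names : List String) (f : String → Int) :
    ∀ (d : PySem.Dict String Int) (r : String), names.Nodup →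
    (names.foldl (fun d k => d.insert k (d.getD k 0 + f k)) d).getD r 0
      = if r ∈ names then d.getD r 0 + f r else d.getD r 0 := by
  induction names with
  | nil => intro d r _; simp
  | cons k t ih =>
      intro d r hnd
      have hk : k ∉ t := (List.nodup_cons.mp hnd).1
      have ht : t.Nodup := (List.nodup_cons.mp hnd).2
      simp only [List.foldl_cons]
      rw [ih _ r ht]
      by_cases hrk : r = k
      · subst hrk
        simp [hk]
      · simp [PySem.Dict.getD_insert, hrk, List.mem_cons]

lemma pvSet_update_self (l : List String) :
    ∀ (s : PySem.Set String), (∀ x ∈ l, x ∈ s) → PySem.Set.update s l = s := by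
  induction l with
  | nil => intro s _; rfl
  | cons x t ih =>
      intro s hs
      have hx : PySem.Set.add s x = s := by
        simp [PySem.Set.add, PySem.Set.contains, hs x (by simp)]
      show PySem.Set.update (PySem.Set.add s x) t = s
      rw [hx]
      exact ih s (fun y hy => hs y (by simp [hy]))

-- max(xs, key=v) on a nonempty list is the explicit first-argmax fold
lemma pvMax?_cons (v : String → Int) (h : String) (tl : List String) :
    PySem.List.max? (h :: tl) v
      = some (tl.foldl (fun m x => if v m < v x then x else m) h) := by
  show List.foldl _ (none : Option String) (h :: tl) = _
  simp only [List.foldl_cons]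
  induction tl generalizing h with
  | nil => rfl
  | cons x t ih =>
      simp only [List.foldl_cons]
      by_cases hc : v h < v x <;> simp [hc, ih]

lemma pvArgmax_mem (v : String → Int) :
    ∀ (tl : List String) (m : String),
      tl.foldl (fun m x => if v m < v x then x else m) m ∈ m :: tl := by
  intro tl
  induction tl with
  | nil => intro m; simp
  | cons x t ih =>
      intro m
      simp only [List.foldl_cons]
      by_cases hc : v m < v x
      · rw [if_pos hc]
        rcases List.mem_cons.mp (ih x) with h | h
        · simp [h]
        · simp [h]
      · rw [if_neg hc]
        rcases List.mem_cons.mp (ih m) with h | h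
        · simp [h]
        · simp [h]

lemma pvArgmax_congr (v w : String → Int) :
    ∀ (tl : List String) (m : String), (∀ x ∈ m :: tl, v x = w x) →
      tl.foldl (fun m x => if v m < v x then x else m) m
        = tl.foldl (fun m x => if w m < w x then x else m) m := by
  intro tl
  induction tl with
  | nil => intro m _; rfl
  | cons x t ih =>
      intro m hv
      simp only [List.foldl_cons]
      have hm : v m = w m := hv m (by simp)
      have hx : v x = w x := hv x (by simp)
      rw [hm, hx]
      by_cases hc : w m < w x
      · simp only [hc, if_pos]
        exact ih x (fun y hy => by
          rcases List.mem_cons.mp hy with h1 | h2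
          · exact h1 ▸ hx
          · exact hv y (by simp [h2]))
      · simp only [hc, if_neg, not_false_iff]
        exact ih m (fun y hy => by
          rcases List.mem_cons.mp hy with h1 | h2
          · exact h1 ▸ hm
          · exact hv y (by simp [h2]))

lemma pvArgmax_val (v : String → Int) :
    ∀ (tl : List String) (m : String),
      v (tl.foldl (fun m x => if v m < v x then x else m) m)
        = (tl.map v).foldl max (v m) := by
  intro tl
  induction tl with
  | nil => intro m; rfl
  | cons x t ih =>
      intro m
      simp only [List.foldl_cons, List.map_cons]
      by_cases hc : v m < v x
      · rw [if_pos hc, ih x, max_eq_right (le_of_lt hc)]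
      · rw [if_neg hc, ih m, max_eq_left (le_of_not_gt hc)]

-- the common per-second value of reindeer r
lemma pvTable_val (indata : List (String × List Int)) (r : String) (sp : List Int)
    (hnd : (indata.map Prod.fst).Nodup) (hmem : (r, sp) ∈ indata)
    (n : Nat) (hn : n < 2503) :
    (PySem.List.pyGet? ((pvTable indata).getD r []) ((n : Nat) : Int)).getD 0
      = pvTot sp (n + 1) := by
  rw [pvTable_getD indata r sp hnd hmem, pvCum_eq]
  rw [PySem.List.pyGet?_natCast]
  rw [List.getElem?_map]
  simp [List.getElem?_range hn]

-- MAIN INVARIANT: after n ticks A's distances are the cumulative totals,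
-- both key sets stay fixed, and A's score dict equals B's score dict.

-- the first n ticks, as the Int list range(n)
def pvL (n : Nat) : List Int := (List.range n).map (fun k => ((k : Nat) : Int))

def pvA (indata : List (String × List Int)) (n : Nat) :
    PySem.Dict String Int × PySem.Dict String Int :=
  (pvL n).foldl (pvLoopA indata (indata.map Prod.fst))
    ((indata.map Prod.fst).foldl
      (fun (p : PySem.Dict String Int × PySem.Dict String Int) r =>
        (p.1.insert r 0, p.2.insert r 0))
      (PySem.Dict.empty, PySem.Dict.empty))

def pvB (indata : List (String × List Int)) (n : Nat) : PySem.Dict String Int :=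
  (pvL n).foldl (pvLoopB (pvTable indata) (indata.map Prod.fst))
    (pvZeroDict (indata.map Prod.fst))

lemma pvL_succ (n : Nat) : pvL (n + 1) = pvL n ++ [((n : Nat) : Int)] := by
  simp [pvL, List.range_succ]

lemma pvMain (indata : List (String × List Int))
    (hne : indata ≠ []) (hnd : (indata.map Prod.fst).Nodup)
    (_hsp : ∀ p ∈ indata, p.2 ≠ []) :
    ∀ n : Nat, n ≤ 2503 →
      (pvA indata n).1.keys = indata.map Prod.fst ∧
      (∀ r sp, (r, sp) ∈ indata → (pvA indata n).1.getD r 0 = pvTot sp n) ∧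
      (pvA indata n).2 = pvB indata n ∧
      (pvB indata n).keys = indata.map Prod.fst := by
  intro n
  induction n with
  | zero =>
      intro _
      have hinit : pvA indata 0
          = (pvZeroDict (indata.map Prod.fst), pvZeroDict (indata.map Prod.fst)) := by
        simp only [pvA, pvL, List.range_zero, List.map_nil, List.foldl_nil]
        exact PySem.List.foldl_prod_mk
          (fun (d : PySem.Dict String Int) r => d.insert r 0)
          (fun (d : PySem.Dict String Int) r => d.insert r 0)
          (indata.map Prod.fst) PySem.Dict.empty PySem.Dict.empty
      refine ⟨?_, ?_, ?_, ?_⟩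
      · rw [hinit]; exact pvZeroDict_keys _ hnd
      · intro r sp hmem
        rw [hinit]
        simpa [pvTot] using pvZeroDict_getD _ hnd r
          (List.mem_map.mpr ⟨(r, sp), hmem, rfl⟩)
      · rw [hinit]; rfl
      · simpa [pvB, pvL] using pvZeroDict_keys _ hnd
  | succ n ih =>
      intro hn
      obtain ⟨ihk, ihd, ihs, ihbk⟩ := ih (by omega)
      have hAstep : pvA indata (n + 1) = pvLoopA indata (indata.map Prod.fst) (pvA indata n) ((n : Nat) : Int) := by
        simp [pvA, pvL_succ]
      have hBstep : pvB indata (n + 1) = pvLoopB (pvTable indata) (indata.map Prod.fst) (pvB indata n) ((n : Nat) : Int) := by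
        simp [pvB, pvL_succ]
      -- the updated distance dict
      set names := indata.map Prod.fst with hnames
      obtain ⟨q, rest, hq⟩ : ∃ q rest, names = q :: rest := by
        cases hnm : names with
        | nil => exact absurd (by simpa [hnames, List.map_eq_nil_iff] using hnm) hne
        | cons q rest => exact ⟨q, rest, rfl⟩
      set dist := names.foldl
        (fun d r => d.insert r (d.getD r 0 + pvTick (pvSpeeds indata r) ((n : Nat) : Int)))
        (pvA indata n).1 with hdist
      have hdk : dist.keys = names := by
        rw [hdist, PySem.Dict.keys_foldl_insert, ihk]
        exact pvSet_update_self names names (fun x hx => hx)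
      have hdv : ∀ r sp, (r, sp) ∈ indata → dist.getD r 0 = pvTot sp (n + 1) := by
        intro r sp hmem
        rw [hdist, pvFoldl_insert_getD names _ _ r hnd,
            if_pos (List.mem_map.mpr ⟨(r, sp), hmem, rfl⟩), ihd r sp hmem,
            pvSpeeds_eq indata r sp hnd hmem, pvTot_succ]
      -- the two leaders coincide
      have hval : ∀ x ∈ names, dist.getD x 0
          = (PySem.List.pyGet? ((pvTable indata).getD x []) ((n : Nat) : Int)).getD 0 := by
        intro x hx
        obtain ⟨⟨r, sp⟩, hmem, hfst⟩ := List.mem_map.mp hx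
        cases hfst
        rw [hdv r sp hmem, pvTable_val indata r sp hnd hmem n (by omega)]
      have hleader :
          (PySem.List.max? dist.keys (fun k => dist.getD k 0)).getD ""
            = (PySem.List.slice names (some 1) none).foldl
                (fun ld r =>
                  if (PySem.List.pyGet? ((pvTable indata).getD r []) ((n : Nat) : Int)).getD 0 >
                     (PySem.List.pyGet? ((pvTable indata).getD ld []) ((n : Nat) : Int)).getD 0
                  then r else ld)
                ((PySem.List.pyGet? names 0).getD "") := by
        rw [hdk, hq, PySem.List.slice_from_one]
        simp only [List.tail_cons, PySem.List.pyGet?_zero_cons, Option.getD_some]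
        rw [pvMax?_cons, Option.getD_some]
        simp only [gt_iff_lt]
        exact pvArgmax_congr _ _ rest q (by rw [← hq]; exact hval)
      have hLmem : (PySem.List.max? dist.keys (fun k => dist.getD k 0)).getD "" ∈ names := by
        rw [hdk, hq, pvMax?_cons, Option.getD_some, ← hq]
        have := pvArgmax_mem (fun k => dist.getD k 0) rest q
        rw [← hq] at this
        exact this
      set L := (PySem.List.max? dist.keys (fun k => dist.getD k 0)).getD "" with hL
      have hA1 : (pvA indata (n + 1)).1 = dist := by
        rw [hAstep]; simp only [pvLoopA]; exact hdist.symm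
      have hA2 : (pvA indata (n + 1)).2 = (pvA indata n).2.insert L ((pvA indata n).2.getD L 0 + 1) := by
        rw [hAstep]; simp only [pvLoopA]; rw [← hdist, ← hL]
      have hB' : pvB indata (n + 1) = (pvB indata n).insert L ((pvB indata n).getD L 0 + 1) := by
        rw [hBstep]; simp only [pvLoopB]; rw [← hleader]
      refine ⟨by rw [hA1, hdk], fun r sp hmem => by rw [hA1]; exact hdv r sp hmem, ?_, ?_⟩
      · rw [hA2, hB', ihs]
      · rw [hB']
        rw [PySem.Dict.keys_insert_of_contains _ _
          ((PySem.Dict.contains_iff_mem_keys _ _).mpr (by rw [ihbk]; exact hLmem))]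
        exact ihbk

lemma pvRange_eq : PySem.List.pyRange 0 pvTravelTime 1 = pvL 2503 := by
  simpa [pvTravelTime, pvL] using PySem.List.pyRange_zero_natCast 2503

lemma pvKeys_mk (indata : List (String × List Int)) :
    (PySem.Dict.mk indata).keys = indata.map Prod.fst := rfl

-- ===== VERDICT (by name: the statement is the Claim_ definition above) =====
theorem part2_spec : Claim_equal_part2 := by
  intro indata _ hpre
  obtain ⟨hne, hnd, hsp⟩ := hpre
  show part2 indata = part2_alt indata
  obtain ⟨hk, hv, hs, hbk⟩ := pvMain indata hne hnd hsp 2503 (le_refl _)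
  set names := indata.map Prod.fst with hnames
  obtain ⟨q, rest, hq⟩ : ∃ q rest, names = q :: rest := by
    cases hnm : names with
    | nil => exact absurd (by simpa [hnames, List.map_eq_nil_iff] using hnm) hne
    | cons q rest => exact ⟨q, rest, rfl⟩
  have hA : part2 indata
      = (pvA indata 2503).2.getD
          ((PySem.List.max? (pvA indata 2503).2.keys
            (fun k => (pvA indata 2503).2.getD k 0)).getD "") 0 := by
    simp only [part2, pvKeys_mk, pvRange_eq, pvA, ← hnames]
  have hB : part2_alt indata
      = (PySem.List.max? (pvB indata 2503).values (fun v => v)).getD 0 := by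
    simp only [part2_alt, pvKeys_mk, pvRange_eq, pvB, pvZeroDict, ← hnames]
  rw [hA, hB, hs]
  set S := pvB indata 2503 with hS
  have hSk : S.keys = names := hbk
  have hvals : S.values = names.map (fun k => S.getD k 0) := by
    rw [← hSk]
    exact PySem.Dict.values_eq_map_keys S (by rw [hSk]; exact hnd) 0
  rw [hSk, hvals, hq, List.map_cons, PySem.List.max?_id_cons, Option.getD_some,
      pvMax?_cons, Option.getD_some]
  have harg := pvArgmax_mem (fun k => S.getD k 0) rest q
  have := pvArgmax_val (fun k => S.getD k 0) rest q
  exact this
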